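-- pv_equiv track=rewrite | github.com/sfgray26/FantasyBaseballEdge | backend/fantasy_baseball/lineup_validator.py | _is_position_eligible
-- ===== SOURCE A (Python) =====
-- from typing import List, Dict, Optional, Set, Tuple, Any
--
-- def _is_position_eligible(player: Dict, slot_position: str) -> bool:
--     """Check if player can fill a slot position."""
--     eligible = player.get("eligible_positions", player.get("positions", []))
--
--     # Normalize
--     slot_pos = slot_position.upper()
--     player_positions = set(p.upper() for p in eligible)
--
--     if slot_pos in player_positions:
--         return True
--
--     # Utility slot accepts any hitter
--     if slot_pos == "UTIL":
--         return bool(player_positions.intersection({"1B", "2B", "3B", "SS", "C", "OF", "LF", "CF", "RF", "DH"}))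
--
--     # OF accepts LF/CF/RF
--     if slot_pos == "OF" and player_positions.intersection({"LF", "CF", "RF"}):
--         return True
--
--     return False
-- ===== SOURCE B (Python) =====
-- _HITTER_POSITIONS = {"1B", "2B", "3B", "SS", "C", "OF", "LF", "CF", "RF", "DH"}
--
-- def _slots_filled_by(pos):
--     """Slots a single (uppercased) player position can fill: itself, OF for corner/center
--     outfielders, UTIL for any hitter position."""
--     slots = {pos}
--     if pos in ("LF", "CF", "RF"):
--         slots.add("OF")
--     if pos in _HITTER_POSITIONS:
--         slots.add("UTIL")
--     return slots
--
-- def _is_position_eligible(player, slot_position):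
--     """Check if player can fill a slot position (dual formulation: expand each player
--     position into the slots it satisfies and look for the requested slot)."""
--     eligible = player.get("eligible_positions", player.get("positions", []))
--     slot_pos = slot_position.upper()
--     for p in eligible:
--         if slot_pos in _slots_filled_by(p.upper()):
--             return True
--     return False
-- ===== Notes on version B (the rewrite author's own statement) =====
-- stated objective: alternative
-- what changed: B inverts A's direction: instead of building the player's position set and testing it against the slot with three sequential branches and two set intersections, B expands each individual player position into the set of slots it can fill (itself, OF for LF/CF/RF, UTIL for any hitter) and scans the positions once for the requested slot with early return.
import Mathlib
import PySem

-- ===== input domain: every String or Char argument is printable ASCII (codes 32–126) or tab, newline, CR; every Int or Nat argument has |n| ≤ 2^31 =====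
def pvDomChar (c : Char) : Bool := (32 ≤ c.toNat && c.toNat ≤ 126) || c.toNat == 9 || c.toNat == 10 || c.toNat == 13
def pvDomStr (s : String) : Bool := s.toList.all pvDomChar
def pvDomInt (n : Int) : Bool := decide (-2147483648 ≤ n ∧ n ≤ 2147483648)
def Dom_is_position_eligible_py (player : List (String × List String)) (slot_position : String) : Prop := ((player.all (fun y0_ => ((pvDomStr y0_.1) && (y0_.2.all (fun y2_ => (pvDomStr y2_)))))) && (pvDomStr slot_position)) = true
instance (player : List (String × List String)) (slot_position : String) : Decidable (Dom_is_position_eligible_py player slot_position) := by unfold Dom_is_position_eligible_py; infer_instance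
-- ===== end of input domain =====

-- B inverts A's direction: each player position is expanded into the set of slots it can fill
-- (itself, OF for LF/CF/RF, UTIL for any hitter) and the positions are scanned once for the
-- requested slot with early return (alternative decomposition, same cost).


-- ===== PORT A =====
def is_position_eligible_py (player : List (String × List String)) (slot_position : String) : Bool :=
  let eligible : List String :=
    ((PySem.Dict.mk player).get? "eligible_positions").getD
      (((PySem.Dict.mk player).get? "positions").getD [])
  let slot_pos := PySem.Str.upper slot_position
  let player_positions : PySem.Set String := PySem.Set.ofList (eligible.map PySem.Str.upper)
  if player_positions.contains slot_pos then
    true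
  else if slot_pos = "UTIL" then
    !(player_positions.inter ["1B", "2B", "3B", "SS", "C", "OF", "LF", "CF", "RF", "DH"]).isEmpty
  else if slot_pos = "OF" && !(player_positions.inter ["LF", "CF", "RF"]).isEmpty then
    true
  else
    false

-- ===== PORT B =====
-- module-level constant _HITTER_POSITIONS
def hitterPositions : PySem.Set String :=
  PySem.Set.ofList ["1B", "2B", "3B", "SS", "C", "OF", "LF", "CF", "RF", "DH"]

-- helper _slots_filled_by: the slots one (uppercased) position can fill
def slotsFilledBy (pos : String) : PySem.Set String :=
  let slots := PySem.Set.ofList [pos]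
  let slots := if ["LF", "CF", "RF"].contains pos then slots.add "OF" else slots
  if hitterPositions.contains pos then slots.add "UTIL" else slots

-- the for-loop with early return
def scanForSlot (slot_pos : String) : List String → Bool
  | [] => false
  | p :: rest =>
    if (slotsFilledBy (PySem.Str.upper p)).contains slot_pos then true
    else scanForSlot slot_pos rest

def is_position_eligible_py_alt (player : List (String × List String)) (slot_position : String) : Bool :=
  let eligible : List String :=
    ((PySem.Dict.mk player).get? "eligible_positions").getD
      (((PySem.Dict.mk player).get? "positions").getD [])
  let slot_pos := PySem.Str.upper slot_position
  scanForSlot slot_pos eligible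

-- ===== PRECONDITION & SPEC =====
def Spec_is_position_eligible_py (player : List (String × List String)) (slot_position : String) (out : Bool) : Prop := out = is_position_eligible_py_alt player slot_position
instance (player : List (String × List String)) (slot_position : String) (out : Bool) : Decidable (Spec_is_position_eligible_py player slot_position out) := by unfold Spec_is_position_eligible_py; infer_instance

-- ===== CLAIM =====
def Claim_equal_is_position_eligible_py : Prop := ∀ (player : List (String × List String)) (slot_position : String), Dom_is_position_eligible_py player slot_position → Spec_is_position_eligible_py player slot_position (is_position_eligible_py player slot_position)

-- ===== LEMMAS AND PROOFS =====

-- A nonempty intersection with the set of uppercased positions is exactly "some position's upper is in the list".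
lemma inter_ofList_nonempty (es hs : List String) :
    (!((PySem.Set.ofList (es.map PySem.Str.upper)).inter hs).isEmpty) =
      es.any (fun p => hs.contains (PySem.Str.upper p)) := by
  rcases h : es.any (fun p => hs.contains (PySem.Str.upper p)) with _ | _
  · simp only [Bool.not_eq_false', List.isEmpty_iff, PySem.Set.inter]
    rw [List.filter_eq_nil_iff]
    intro x hx
    rw [PySem.Set.mem_ofList] at hx
    simp only [List.any_eq_false] at h
    simp only [List.mem_map] at hx
    obtain ⟨p, hp, rfl⟩ := hx
    simpa using h p hp
  · simp only [Bool.not_eq_true', List.isEmpty_eq_false_iff]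
    simp only [List.any_eq_true] at h
    obtain ⟨p, hp, hc⟩ := h
    intro hnil
    have hx : PySem.Str.upper p ∈ (PySem.Set.ofList (es.map PySem.Str.upper)).inter hs := by
      simp only [PySem.Set.inter, List.mem_filter]
      exact ⟨(PySem.Set.mem_ofList _ _).mpr (List.mem_map_of_mem hp), hc⟩
    rw [hnil] at hx
    exact absurd hx (List.not_mem_nil)

-- Membership in the uppercased-position set is a single any-pass over the raw positions.
lemma contains_ofList_upper (es : List String) (s : String) :
    (PySem.Set.ofList (es.map PySem.Str.upper)).contains s =
      es.any (fun p => PySem.Str.upper p == s) := by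
  rw [Bool.eq_iff_iff]
  simp only [PySem.Set.contains, List.contains_eq_mem, decide_eq_true_eq,
    PySem.Set.mem_ofList, List.any_eq_true, List.mem_map, beq_iff_eq]

-- Characterisation of B's per-position slot set.
lemma contains_slotsFilledBy (q slot : String) :
    (slotsFilledBy q).contains slot =
      ((slot == q) || ((slot == "OF") && List.contains ["LF", "CF", "RF"] q)
        || ((slot == "UTIL") && hitterPositions.contains q)) := by
  rw [Bool.eq_iff_iff]
  simp only [slotsFilledBy, PySem.Set.contains_iff]
  split_ifs with h1 h2 h3 <;>
    simp_all [PySem.Set.mem_add, PySem.Set.mem_ofList, List.contains_eq_mem]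

-- The early-return scan is the any-pass.
lemma scanForSlot_eq_any (slot : String) (es : List String) :
    scanForSlot slot es = es.any (fun p => (slotsFilledBy (PySem.Str.upper p)).contains slot) := by
  induction es with
  | nil => rfl
  | cons p rest ih =>
    simp only [scanForSlot, List.any_cons]
    cases h : (slotsFilledBy (PySem.Str.upper p)).contains slot with
    | true => simp [h]
    | false => simp [h, ih]

lemma any_or {α : Type} (es : List α) (f g : α → Bool) :
    es.any (fun x => f x || g x) = (es.any f || es.any g) := by
  rw [Bool.eq_iff_iff]
  simp only [List.any_eq_true, Bool.or_eq_true]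
  constructor
  · rintro ⟨x, hx, h | h⟩
    exacts [Or.inl ⟨x, hx, h⟩, Or.inr ⟨x, hx, h⟩]
  · rintro (⟨x, hx, h⟩ | ⟨x, hx, h⟩)
    exacts [⟨x, hx, Or.inl h⟩, ⟨x, hx, Or.inr h⟩]

-- any over a symmetric beq predicate.
lemma any_beq_comm (es : List String) (s : String) :
    (es.any fun p => s == PySem.Str.upper p) = (es.any fun p => PySem.Str.upper p == s) := by
  rw [Bool.eq_iff_iff]
  simp only [List.any_eq_true, beq_iff_eq]
  constructor <;> rintro ⟨x, hx, h⟩ <;> exact ⟨x, hx, h.symm⟩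

-- ===== VERDICT =====
theorem is_position_eligible_py_spec : Claim_equal_is_position_eligible_py := by
  intro player slot_position _
  simp only [Spec_is_position_eligible_py, is_position_eligible_py, is_position_eligible_py_alt]
  generalize ((PySem.Dict.mk player).get? "eligible_positions").getD
      (((PySem.Dict.mk player).get? "positions").getD []) = es
  generalize PySem.Str.upper slot_position = slot
  rw [scanForSlot_eq_any]
  simp only [contains_slotsFilledBy, hitterPositions]
  by_cases hU : slot = "UTIL"
  · subst hU
    simp only [contains_ofList_upper, inter_ofList_nonempty]
    simp only [show (("UTIL" : String) == "OF") = false from rfl,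
      show (("UTIL" : String) == "UTIL") = true from rfl, Bool.false_and, Bool.true_and,
      Bool.or_false,
      show PySem.Set.ofList ["1B", "2B", "3B", "SS", "C", "OF", "LF", "CF", "RF", "DH"] =
        ["1B", "2B", "3B", "SS", "C", "OF", "LF", "CF", "RF", "DH"] from rfl,
      PySem.Set.contains_eq_listContains]
    rw [any_or, any_beq_comm]
    by_cases h1 : (es.any fun p => PySem.Str.upper p == "UTIL") = true <;> simp [h1]
  · by_cases hO : slot = "OF"
    · subst hO
      simp only [contains_ofList_upper, inter_ofList_nonempty]
      simp only [show (("OF" : String) == "OF") = true from rfl,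
        show (("OF" : String) == "UTIL") = false from rfl, Bool.false_and, Bool.true_and,
        Bool.or_false, if_neg hU]
      rw [any_or, any_beq_comm]
      by_cases h1 : (es.any fun p => PySem.Str.upper p == "OF") = true <;>
        by_cases h2 : (es.any fun p => List.contains ["LF", "CF", "RF"] (PySem.Str.upper p)) = true <;>
        simp [h1, h2]
      all_goals
        rw [Bool.eq_iff_iff]
        simp [List.any_eq_true]
    · rw [contains_ofList_upper]
      have hu : (slot == "UTIL") = false := by simp [hU]
      have ho : (slot == "OF") = false := by simp [hO]
      simp only [hu, ho, Bool.false_and, Bool.or_false, if_neg hU]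
      rw [any_beq_comm]
      rw [decide_eq_false hO]
      by_cases h1 : (es.any fun p => PySem.Str.upper p == slot) = true <;> simp [h1]
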